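-- pv_equiv track=rewrite | github.com/parththakar2003/Secure-CipherStegno-Tool | src/steganography/document_stego.py | encode_unicode
-- ===== SOURCE A (Python) =====
-- def encode_unicode(text, message):
--     """
--     Encode message using zero-width Unicode characters
--
--     Args:
--         text (str): Cover text
--         message (str): Message to hide
--
--     Returns:
--         str: Stego text
--     """
--     # Zero-width characters
--     ZERO_WIDTH_SPACE = '\u200B'      # 0
--     ZERO_WIDTH_NON_JOINER = '\u200C'  # 1
--
--     # Convert message to binary
--     binary = ''.join(format(ord(c), '08b') for c in message)
--     binary += '11111111'  # End marker
--
--     if len(binary) > len(text):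
--         raise ValueError("Message too long for cover text")
--
--     # Insert zero-width characters
--     stego_text = ''
--     for i, char in enumerate(text):
--         stego_text += char
--         if i < len(binary):
--             if binary[i] == '0':
--                 stego_text += ZERO_WIDTH_SPACE
--             else:
--                 stego_text += ZERO_WIDTH_NON_JOINER
--
--     return stego_text
-- ===== SOURCE B (Python) =====
-- def encode_unicode(text, message):
--     """Block-wise re-implementation: consumes the cover text eight chars per
--     message byte, deriving bits arithmetically; never builds a bit string."""
--     ZWS, ZWNJ = '\u200B', '\u200C'
--     if 8 * len(message) + 8 > len(text):
--         raise ValueError("Message too long for cover text")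
--     parts = []
--     rest = text
--     for ch in message:
--         code = ord(ch)
--         block, rest = rest[:8], rest[8:]
--         parts.append(''.join(c + (ZWNJ if (code >> k) & 1 else ZWS)
--                              for c, k in zip(block, reversed(range(8)))))
--     marker, rest = rest[:8], rest[8:]
--     parts.append(''.join(c + ZWNJ for c in marker))
--     parts.append(rest)
--     return ''.join(parts)
-- ===== Notes on version B (the rewrite author's own statement) =====
-- stated objective: alternative
-- what changed: A builds one global bit string and loops over the cover text interleaving a zero-width char per bit; B never builds a bit string: it iterates over the MESSAGE, slicing the cover text into consecutive 8-char blocks, pairing each block's chars with bits obtained by arithmetic shifts of ord(ch), then emits a dedicated all-ZWNJ marker block and the untouched tail.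
import Mathlib
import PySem

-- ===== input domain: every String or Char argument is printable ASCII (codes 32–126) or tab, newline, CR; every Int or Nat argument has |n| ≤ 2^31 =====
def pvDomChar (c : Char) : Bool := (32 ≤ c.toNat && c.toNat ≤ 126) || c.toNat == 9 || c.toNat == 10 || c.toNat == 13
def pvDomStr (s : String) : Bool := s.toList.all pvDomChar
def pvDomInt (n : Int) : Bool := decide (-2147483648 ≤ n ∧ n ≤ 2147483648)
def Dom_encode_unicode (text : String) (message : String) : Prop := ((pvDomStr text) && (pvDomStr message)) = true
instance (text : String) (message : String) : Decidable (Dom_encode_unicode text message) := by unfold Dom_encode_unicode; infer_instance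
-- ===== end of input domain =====

-- B is a block-wise alternative: it iterates over the message, consuming the cover text in
-- 8-char slices with bits from arithmetic shifts, instead of A's single indexed loop over
-- the cover text against a precomputed bit string (return value only).

-- ===== PORT A =====
-- format(ord(c), '08b'): exact for code points < 256, which Dom guarantees (ASCII ≤ 126)
def bin8 (n : Nat) : List Char :=
  (List.range 8).map (fun j => if (n >>> (7 - j)) &&& 1 = 1 then '1' else '0')

def encode_unicode (text : String) (message : String) : String :=
  let binary := (message.toList.flatMap (fun c => bin8 c.toNat)) ++ "11111111".toList
  -- Python raises ValueError if len(binary) > len(text); those inputs are excluded by Pre_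
  let stego := (PySem.List.enumerate text.toList 0).foldl
      (fun acc ci => acc ++ [ci.2] ++
        (if ci.1 < (binary.length : Int) then
          (if binary[ci.1.toNat]! = '0' then ['\u200B'] else ['\u200C'])
         else [])) []
  String.ofList stego

-- ===== PORT B =====
-- the for-loop over message (carrying `rest` and appending one block per message char),
-- followed by the marker block and the tail, transcribed as recursion over the message
def encBlocks : List Char → List Char → List Char
  | [], rest =>
      ((rest.take 8).flatMap (fun c => [c, '\u200C'])) ++ rest.drop 8
  | ch :: ms, rest =>
      (((rest.take 8).zip (List.range 8).reverse).map
        (fun p => [p.1, if (ch.toNat >>> p.2) &&& 1 = 1 then '\u200C' else '\u200B'])).flatten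
      ++ encBlocks ms (rest.drop 8)

def encode_unicode_alt (text : String) (message : String) : String :=
  String.ofList (encBlocks message.toList text.toList)

-- ===== PRECONDITION & SPEC =====
-- Pre_ excludes exactly the inputs where A raises ValueError ("Message too long for cover text").
def Pre_encode_unicode (text : String) (message : String) : Prop :=
  8 * message.length + 8 ≤ text.length
instance (text : String) (message : String) : Decidable (Pre_encode_unicode text message) := by
  unfold Pre_encode_unicode; infer_instance
def pvWitness_encode_unicode : String × String := ("abcdefghijklmnop", "A")

def Spec_encode_unicode (text : String) (message : String) (out : String) : Prop :=
  out = encode_unicode_alt text message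
instance (text : String) (message : String) (out : String) : Decidable (Spec_encode_unicode text message out) := by
  unfold Spec_encode_unicode; infer_instance

-- ===== CLAIM (what is proved, stated in full; the proofs are below) =====
def Claim_equal_encode_unicode : Prop := ∀ (text : String) (message : String), Dom_encode_unicode text message → Pre_encode_unicode text message → Spec_encode_unicode text message (encode_unicode text message)

-- ===== LEMMAS AND PROOFS =====

-- the interleaving A's loop computes
def inter : List Char → List Char → List Char
  | ts, [] => ts
  | [], _ :: _ => []
  | t :: ts, b :: bs => t :: (if b = '0' then '\u200B' else '\u200C') :: inter ts bs

def pairUp (ts bs : List Char) : List Char :=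
  ((ts.zip bs).map (fun p => [p.1, if p.2 = '0' then '\u200B' else '\u200C'])).flatten

lemma loopA (ts bits : List Char) (s : Nat) (acc : List Char) :
    (PySem.List.enumerate ts (s : Int)).foldl
      (fun acc ci => acc ++ [ci.2] ++
        (if ci.1 < (bits.length : Int) then
          (if bits[ci.1.toNat]! = '0' then ['\u200B'] else ['\u200C'])
         else [])) acc
    = acc ++ inter ts (bits.drop s) := by
  induction ts generalizing s acc with
  | nil =>
      cases h : bits.drop s with
      | nil => simp [PySem.List.enumerate, inter]
      | cons b bs => simp [PySem.List.enumerate, inter]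
  | cons t ts ih =>
      rw [PySem.List.enumerate_cons]
      simp only [List.foldl_cons]
      by_cases h : s < bits.length
      · have hcond : ((s : Int) < (bits.length : Int)) := by exact_mod_cast h
        have hget : bits[s]! = bits[s] := getElem!_pos bits s h
        have hdrop : bits.drop s = bits[s] :: bits.drop (s + 1) := (List.getElem_cons_drop h).symm
        have : ((s : Int) + 1) = ((s + 1 : Nat) : Int) := by push_cast; ring
        rw [this, ih]
        simp only [hcond, if_pos, Int.toNat_natCast, hget, hdrop, inter]
        by_cases h0 : bits[s] = '0' <;> simp [h0, List.append_assoc]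
      · have hcond : ¬ ((s : Int) < (bits.length : Int)) := by exact_mod_cast h
        have hdrop : bits.drop s = [] := List.drop_eq_nil_of_le (by omega)
        have hdrop' : bits.drop (s + 1) = [] := List.drop_eq_nil_of_le (by omega)
        have : ((s : Int) + 1) = ((s + 1 : Nat) : Int) := by push_cast; ring
        rw [this, ih]
        simp [hcond, hdrop, hdrop', inter]

lemma inter_append (bs : List Char) : ∀ (ts cs : List Char), bs.length ≤ ts.length →
    inter ts (bs ++ cs) = pairUp ts bs ++ inter (ts.drop bs.length) cs := by
  induction bs with
  | nil => intro ts cs _; simp [pairUp]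
  | cons b bs ih =>
      intro ts cs h
      cases ts with
      | nil => simp at h
      | cons t ts =>
          simp only [List.cons_append, inter, pairUp, List.zip_cons_cons, List.map_cons,
            List.flatten_cons, List.length_cons, List.drop_succ_cons]
          rw [ih ts cs (by simpa using h)]
          simp [pairUp]

lemma pairUp_congr {β γ : Type} (m : β → Char) (g : γ → Char) : ∀ (ts : List Char) (bs : List β) (ks : List γ),
    bs.map m = ks.map g →
    ((ts.zip bs).map (fun p => [p.1, m p.2])).flatten
      = ((ts.zip ks).map (fun p => [p.1, g p.2])).flatten := by
  intro ts
  induction ts with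
  | nil => intro bs ks _; simp
  | cons t ts ih =>
      intro bs ks h
      cases bs with
      | nil => cases ks with
        | nil => rfl
        | cons k ks => simp at h
      | cons b bs =>
          cases ks with
          | nil => simp at h
          | cons k ks =>
              simp only [List.map_cons, List.cons.injEq] at h
              simp [h.1, ih bs ks h.2]

lemma pairUp_zip_take (bs : List Char) : ∀ (ts : List Char),
    pairUp ts bs = pairUp (ts.take bs.length) bs := by
  induction bs with
  | nil => intro ts; simp [pairUp]
  | cons b bs ih =>
      intro ts
      cases ts with
      | nil => rfl
      | cons t ts => simp [pairUp] at ih ⊢; exact ih ts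

lemma bin8_map (n : Nat) :
    (bin8 n).map (fun c => if c = '0' then '\u200B' else '\u200C')
      = ((List.range 8).reverse).map
          (fun k => if (n >>> k) &&& 1 = 1 then '\u200C' else '\u200B') := by
  have hrev : (List.range 8).reverse = (List.range 8).map (fun j => 7 - j) := by decide
  rw [hrev, bin8, List.map_map, List.map_map]
  apply List.map_congr_left
  intro j _
  simp only [Nat.and_one_is_mod]
  rcases Nat.mod_two_eq_zero_or_one (n >>> (7 - j)) with h | h <;> simp [h]

lemma inter_marker : ∀ (n : Nat) (ts : List Char), n ≤ ts.length →
    inter ts (List.replicate n '1')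
      = (ts.take n).flatMap (fun c => [c, '\u200C']) ++ ts.drop n := by
  intro n
  induction n with
  | zero => intro ts _; simp [inter]
  | succ n ih =>
      intro ts h
      cases ts with
      | nil => simp at h
      | cons t ts =>
          simp only [List.replicate_succ, inter, List.take_succ_cons, List.drop_succ_cons,
            List.flatMap_cons]
          rw [ih ts (by simpa using h)]
          simp

lemma main_eq : ∀ (msg ts : List Char), 8 * msg.length + 8 ≤ ts.length →
    inter ts ((msg.flatMap (fun c => bin8 c.toNat)) ++ List.replicate 8 '1')
      = encBlocks msg ts := by
  intro msg
  induction msg with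
  | nil =>
      intro ts h
      simp only [List.flatMap_nil, List.nil_append, encBlocks]
      exact inter_marker 8 ts (by simpa using h)
  | cons ch ms ih =>
      intro ts h
      have hlen8 : (bin8 ch.toNat).length = 8 := by simp [bin8]
      have hle : (bin8 ch.toNat).length ≤ ts.length := by
        rw [hlen8]; simp [List.length_cons] at h; omega
      rw [List.flatMap_cons, List.append_assoc, inter_append _ _ _ hle, hlen8]
      rw [ih (ts.drop 8) (by simp [List.length_cons] at h ⊢; omega)]
      have hpair : pairUp ts (bin8 ch.toNat)
          = (((ts.take 8).zip (List.range 8).reverse).map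
              (fun p => [p.1, if (ch.toNat >>> p.2) &&& 1 = 1 then '\u200C' else '\u200B'])).flatten := by
        rw [pairUp_zip_take, hlen8, pairUp]
        exact pairUp_congr _ _ (ts.take 8) (bin8 ch.toNat) ((List.range 8).reverse)
          (bin8_map ch.toNat)
      rw [hpair]; rfl

-- ===== VERDICT (by name: the statement is the Claim_ definition above) =====
theorem encode_unicode_spec : Claim_equal_encode_unicode := by
  intro text message _ hpre
  unfold Spec_encode_unicode
  simp only [encode_unicode, encode_unicode_alt]
  have h0 : ((0 : Int)) = ((0 : Nat) : Int) := by norm_num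
  rw [h0, loopA, List.drop_zero, List.nil_append]
  have hm : "11111111".toList = List.replicate 8 '1' := by decide
  rw [hm, main_eq]
  unfold Pre_encode_unicode at hpre
  rw [String.length_toList, String.length_toList]
  exact hpre
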